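-- pv_equiv track=rewrite | github.com/ispras/qdt | qemu/cpu/instruction.py | bits_to_intervals
-- ===== SOURCE A (Python) =====
-- def bits_to_intervals(bits):
--     """ Converts bit numbers to bit intervals.
--
-- :returns: list of tuples: [(bitoffset_0, bitsize_0), ...]
--     """
--
--     if not bits:
--         return []
--
--     bit_numbers = sorted(bits)
--     result = []
--     bitoffset = prev_bit = bit_numbers[0]
--     bitsize = 1
--
--     for bit in bit_numbers[1:]:
--         if bit - prev_bit == 1:
--             bitsize += 1
--         else:
--             result.append((bitoffset, bitsize))
--             bitoffset = bit
--             bitsize = 1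
--
--         prev_bit = bit
--
--     result.append((bitoffset, bitsize))
--     return result
-- ===== SOURCE B (Python) =====
-- def _ivs(b):
--     # intervals of an already-sorted list, by divide and conquer
--     n = len(b)
--     if n == 0:
--         return []
--     if n == 1:
--         return [(b[0], 1)]
--     left = _ivs(b[:n // 2])
--     right = _ivs(b[n // 2:])
--     (lo, ls), (ro, rs) = left[-1], right[0]
--     if ro == lo + ls:  # right's first run continues left's last run
--         return left[:-1] + [(lo, ls + rs)] + right[1:]
--     return left + right
--
--
-- def bits_to_intervals(bits):
--     """ Converts bit numbers to bit intervals.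
--
-- :returns: list of tuples: [(bitoffset_0, bitsize_0), ...]
--     """
--     return _ivs(sorted(bits))
-- ===== Notes on version B (the rewrite author's own statement) =====
-- stated objective: alternative
-- what changed: Replaces A's single linear scan with mutable (offset, size, prev) state by a divide-and-conquer recursion: split the sorted list in half, compute each half's intervals recursively, and merge the halves' interval lists, coalescing the boundary intervals when the right half's first run continues the left half's last run (correct because every emitted interval covers exactly the consecutive values offset..offset+size-1).
import Mathlib
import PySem

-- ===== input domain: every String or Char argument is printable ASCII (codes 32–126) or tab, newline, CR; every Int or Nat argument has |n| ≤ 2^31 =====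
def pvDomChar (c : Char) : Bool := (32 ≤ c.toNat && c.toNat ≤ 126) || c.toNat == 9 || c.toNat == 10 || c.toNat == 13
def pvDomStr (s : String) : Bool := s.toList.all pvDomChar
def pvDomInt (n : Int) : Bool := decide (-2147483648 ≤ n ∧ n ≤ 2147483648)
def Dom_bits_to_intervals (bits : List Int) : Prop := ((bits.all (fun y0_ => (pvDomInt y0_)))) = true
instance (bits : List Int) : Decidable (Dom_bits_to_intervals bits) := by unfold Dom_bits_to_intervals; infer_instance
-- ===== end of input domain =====

-- B replaces A's single accumulator scan by a divide-and-conquer recursion over the sorted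
-- list, merging the halves' interval lists at the boundary (alternative decomposition).


-- ===== PORT A =====
-- literal port of A: guard on empty, sort, then one pass over bit_numbers[1:] with
-- state (result, bitoffset, bitsize, prev_bit); bit_numbers[0]/[1:] are head/tail of the
-- (nonempty) sorted list, matched structurally.
def bits_to_intervals (bits : List Int) : List (Int × Int) :=
  if bits.isEmpty then []
  else
    match PySem.List.sorted bits (fun x => x) false with
    | [] => []  -- unreachable: sorted preserves length
    | b0 :: rest =>
      let st := rest.foldl
        (fun (s : List (Int × Int) × Int × Int × Int) bit =>
          if bit - s.2.2.2 = 1 then (s.1, s.2.1, s.2.2.1 + 1, bit)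
          else (s.1 ++ [(s.2.1, s.2.2.1)], bit, 1, bit))
        ([], b0, 1, b0)
      st.1 ++ [(st.2.1, st.2.2.1)]

-- ===== PORT B =====
-- _ivs of Source B: divide and conquer on the (already sorted) list; b[:n//2] / b[n//2:] are
-- List.take / List.drop (exact for this in-range nonnegative split index); left[-1] and
-- right[0] are read via getLast?/head? (both recursive results are provably nonempty, the
-- `| _, _ =>` fallback is unreachable).
def pvIvs (b : List Int) : List (Int × Int) :=
  if b.length = 0 then []
  else if b.length = 1 then [(b.getD 0 0, 1)]
  else
    let left := pvIvs (b.take (b.length / 2))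
    let right := pvIvs (b.drop (b.length / 2))
    match left.getLast?, right.head? with
    | some (lo, ls), some (ro, rs) =>
      if ro = lo + ls then left.dropLast ++ [(lo, ls + rs)] ++ right.tail
      else left ++ right
    | _, _ => left ++ right
termination_by b.length
decreasing_by
  · simp only [List.length_take]; omega
  · simp only [List.length_drop]; omega

def bits_to_intervals_alt (bits : List Int) : List (Int × Int) :=
  pvIvs (PySem.List.sorted bits (fun x => x) false)

-- ===== PRECONDITION & SPEC =====
def Spec_bits_to_intervals (bits : List Int) (out : List (Int × Int)) : Prop := out = bits_to_intervals_alt bits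
instance (bits : List Int) (out : List (Int × Int)) : Decidable (Spec_bits_to_intervals bits out) := by unfold Spec_bits_to_intervals; infer_instance

-- ===== CLAIM (what is proved, stated in full; the proofs are below) =====
def Claim_equal_bits_to_intervals : Prop := ∀ (bits : List Int), Dom_bits_to_intervals bits → Spec_bits_to_intervals bits (bits_to_intervals bits)

-- ===== LEMMAS AND PROOFS =====

-- structural spec of A's scan: remaining intervals given current (offset, size, prev)
def intervalsFrom (offset size prev : Int) : List Int → List (Int × Int)
  | [] => [(offset, size)]
  | b :: bs =>
    if b - prev = 1 then intervalsFrom offset (size + 1) b bs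
    else (offset, size) :: intervalsFrom b 1 b bs

-- the scan itself (intervals of an arbitrary list, in A's grouping)
def scanIvs : List Int → List (Int × Int)
  | [] => []
  | x :: xs => intervalsFrom x 1 x xs

-- structural run length: longest prefix of xs continuing prev by steps of 1
def pvRun (prev : Int) : List Int → Nat
  | [] => 0
  | y :: ys => if y - prev = 1 then pvRun y ys + 1 else 0

-- run-by-run form of the scan (used to match heads/tails across different start states)
def pvGo : List Int → List (Int × Int)
  | [] => []
  | x :: xs =>
    (x, (1 : Int) + (pvRun x xs : Int)) :: pvGo (xs.drop (pvRun x xs))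
termination_by xs => xs.length
decreasing_by
  simp only [List.length_drop, List.length_cons]; omega

-- A's foldl equals intervalsFrom
theorem foldA_eq (rest : List Int) (acc : List (Int × Int)) (offset size prev : Int) :
    (let st := rest.foldl
        (fun (s : List (Int × Int) × Int × Int × Int) bit =>
          if bit - s.2.2.2 = 1 then (s.1, s.2.1, s.2.2.1 + 1, bit)
          else (s.1 ++ [(s.2.1, s.2.2.1)], bit, 1, bit))
        (acc, offset, size, prev);
      st.1 ++ [(st.2.1, st.2.2.1)]) = acc ++ intervalsFrom offset size prev rest := by
  induction rest generalizing acc offset size prev with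
  | nil => simp [intervalsFrom]
  | cons b bs ih =>
    simp only [List.foldl_cons, intervalsFrom]
    by_cases hb : b - prev = 1
    · simp only [if_pos hb]
      exact ih acc offset (size + 1) b
    · simp only [if_neg hb]
      rw [ih (acc ++ [(offset, size)]) b 1 b]
      simp

theorem intervalsFrom_ne_nil (xs : List Int) (o s p : Int) : intervalsFrom o s p xs ≠ [] := by
  induction xs generalizing o s p with
  | nil => simp [intervalsFrom]
  | cons b bs ih =>
    simp only [intervalsFrom]
    by_cases hb : b - p = 1
    · rw [if_pos hb]; exact ih o (s + 1) b
    · rw [if_neg hb]; simp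

-- intervalsFrom peels exactly one maximal run, in pvGo's shape
theorem intervalsFrom_eq_run (n : Nat) (rest : List Int) (hn : rest.length ≤ n)
    (offset size prev : Int) :
    intervalsFrom offset size prev rest =
      (offset, size + (pvRun prev rest : Int)) :: pvGo (rest.drop (pvRun prev rest)) := by
  induction n generalizing rest offset size prev with
  | zero =>
    have : rest = [] := List.eq_nil_of_length_eq_zero (by omega)
    subst this; simp [intervalsFrom, pvRun, pvGo]
  | succ n ih =>
    cases rest with
    | nil => simp [intervalsFrom, pvRun, pvGo]
    | cons b bs =>
      have hbs : bs.length ≤ n := by simp at hn; omega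
      simp only [intervalsFrom, pvRun]
      by_cases hb : b - prev = 1
      · simp only [if_pos hb]
        rw [ih bs hbs offset (size + 1) b]
        simp only [List.drop_succ_cons, List.cons.injEq, Prod.mk.injEq]
        and_intros <;> first | trivial | (push_cast; ring)
      · simp only [if_neg hb]
        rw [ih bs hbs b 1 b]
        simp [pvGo]

-- splitting the scanned list: the scan of xs ++ ys is the scan of xs with its last
-- interval re-opened (its last element is o' + s' - 1, since each interval covers exactly
-- the consecutive values o' .. o' + s' - 1) and continued through ys
theorem intervalsFrom_append (xs : List Int) : ∀ (ys : List Int) (o s p : Int), p = o + s - 1 →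
    intervalsFrom o s p (xs ++ ys) =
      (intervalsFrom o s p xs).dropLast ++
        (match (intervalsFrom o s p xs).getLast? with
         | some (o', s') => intervalsFrom o' s' (o' + s' - 1) ys
         | none => []) := by
  induction xs with
  | nil =>
    intro ys o s p hp
    subst hp
    simp [intervalsFrom]
  | cons b bs ih =>
    intro ys o s p hp
    simp only [List.cons_append, intervalsFrom]
    by_cases hb : b - p = 1
    · simp only [if_pos hb]
      exact ih ys o (s + 1) b (by omega)
    · simp only [if_neg hb]
      rw [ih ys b 1 b (by ring)]
      cases hc : intervalsFrom b 1 b bs with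
      | nil => exact absurd hc (intervalsFrom_ne_nil bs b 1 b)
      | cons c cs =>
        simp [List.dropLast_cons_of_ne_nil]

-- B's divide and conquer computes A's scan
theorem pvIvs_eq_scan (n : Nat) : ∀ (b : List Int), b.length ≤ n → pvIvs b = scanIvs b := by
  induction n with
  | zero =>
    intro b hb
    have : b = [] := List.eq_nil_of_length_eq_zero (by omega)
    subst this; simp [pvIvs, scanIvs]
  | succ n ih =>
    intro b hb
    by_cases h0 : b.length = 0
    · have : b = [] := List.eq_nil_of_length_eq_zero h0
      subst this; simp [pvIvs, scanIvs]
    · by_cases h1 : b.length = 1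
      · match b, h1 with
        | [x], _ => simp [pvIvs, scanIvs, intervalsFrom]
      · have hlen : 2 ≤ b.length := by omega
        rw [pvIvs, if_neg h0, if_neg h1]
        have hL : (b.take (b.length / 2)).length = b.length / 2 := by simp; omega
        have hR : (b.drop (b.length / 2)).length = b.length - b.length / 2 := by simp
        rw [ih (b.take (b.length / 2)) (by omega), ih (b.drop (b.length / 2)) (by omega)]
        cases hLc : b.take (b.length / 2) with
        | nil => rw [hLc] at hL; simp at hL; omega
        | cons l0 lt =>
        cases hRc : b.drop (b.length / 2) with
        | nil => rw [hRc] at hR; simp at hR; omega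
        | cons r0 rt =>
        have hsplit : b = (l0 :: lt) ++ (r0 :: rt) := by
          rw [← hLc, ← hRc, List.take_append_drop]
        -- rewrite the right-hand scan
        conv_rhs => rw [hsplit]
        simp only [scanIvs, List.cons_append]
        have hA := intervalsFrom_append lt (r0 :: rt) l0 1 l0 (by ring)
        -- name the left scan and expose its last interval
        cases hgl : (intervalsFrom l0 1 l0 lt).getLast? with
        | none =>
          exact absurd (List.getLast?_eq_none_iff.mp hgl) (intervalsFrom_ne_nil lt l0 1 l0)
        | some q =>
        obtain ⟨lo, ls⟩ := q
        obtain ⟨l', hl'⟩ := List.getLast?_eq_some_iff.mp hgl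
        -- expose the right scan's head and tail
        have hRrun := intervalsFrom_eq_run rt.length rt le_rfl r0 1 r0
        rw [hA, hgl]
        simp only []
        rw [hl', List.dropLast_concat, hRrun]
        simp only [List.head?_cons, List.tail_cons, intervalsFrom]
        by_cases hm : r0 = lo + ls
        · rw [if_pos hm, if_pos (by omega : r0 - (lo + ls - 1) = 1)]
          rw [intervalsFrom_eq_run rt.length rt le_rfl lo (ls + 1) r0]
          have hn : ls + (1 + (pvRun r0 rt : Int)) = ls + 1 + (pvRun r0 rt : Int) := by ring
          simp [hn]
        · rw [if_neg hm, if_neg (by omega : ¬ (r0 - (lo + ls - 1) = 1)), hRrun]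
          simp

-- ===== VERDICT (by name: the statement is the Claim_ definition above) =====
theorem bits_to_intervals_spec : Claim_equal_bits_to_intervals := by
  intro bits _
  unfold Spec_bits_to_intervals bits_to_intervals bits_to_intervals_alt
  by_cases hb : bits.isEmpty
  · have : bits = [] := List.isEmpty_iff.mp hb
    subst this
    simp [PySem.List.sorted, pvIvs]
  · rw [if_neg hb]
    rw [pvIvs_eq_scan (PySem.List.sorted bits (fun x => x) false).length _ le_rfl]
    cases hs : PySem.List.sorted bits (fun x => x) false with
    | nil =>
      exfalso
      have hlen := PySem.List.length_sorted (xs := bits) (key := fun x : Int => x) (rev := false)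
      rw [hs] at hlen
      simp at hlen
      exact hb (by simp [List.eq_nil_of_length_eq_zero hlen.symm])
    | cons b0 rest =>
      simpa [scanIvs] using foldA_eq rest [] b0 1 b0
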